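-- pv_equiv track=rewrite | github.com/Cefireist/algoritmos-1 | guia8/ej21.py | obtener_maximos
-- ===== SOURCE A (Python) =====
-- def obtener_maximos(frecuencias_palabras:list[tuple[str,int]]) -> list[tuple[str,int]]:
--     maximo:int = -1
--     mas_frecuentes:list[str] = []
--     for tupla in frecuencias_palabras:
--         if maximo < tupla[1]:
--             maximo = tupla[1]
--     for tupla in frecuencias_palabras:
--         if maximo == tupla[1]:
--             mas_frecuentes.append(tupla)
--     return mas_frecuentes
-- ===== SOURCE B (Python) =====
-- def obtener_maximos(frecuencias_palabras: list[tuple[str, int]]) -> list[tuple[str, int]]: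
--     maximo = -1
--     mas_frecuentes = []
--     for tupla in frecuencias_palabras:
--         if tupla[1] > maximo:
--             maximo = tupla[1]
--             mas_frecuentes = [tupla]
--         elif tupla[1] == maximo:
--             mas_frecuentes.append(tupla)
--     return mas_frecuentes
-- ===== Notes on version B (the rewrite author's own statement) =====
-- stated objective: alternative
-- what changed: Replaced A's two separate scans (one to find the maximum frequency, one to collect tuples with it) by a single pass maintaining a running maximum together with a resettable candidate list.
import Mathlib
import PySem

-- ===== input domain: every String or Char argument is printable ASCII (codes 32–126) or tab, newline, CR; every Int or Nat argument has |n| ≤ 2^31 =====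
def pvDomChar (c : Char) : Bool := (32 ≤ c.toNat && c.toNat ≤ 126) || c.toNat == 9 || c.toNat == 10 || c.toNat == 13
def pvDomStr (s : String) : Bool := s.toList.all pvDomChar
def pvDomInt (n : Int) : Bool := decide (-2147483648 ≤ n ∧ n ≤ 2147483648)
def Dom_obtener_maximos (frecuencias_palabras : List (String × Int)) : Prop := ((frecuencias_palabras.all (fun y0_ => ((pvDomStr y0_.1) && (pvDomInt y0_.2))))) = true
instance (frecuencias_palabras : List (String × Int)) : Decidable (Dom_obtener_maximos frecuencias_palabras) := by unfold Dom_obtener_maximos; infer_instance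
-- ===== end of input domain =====

-- B replaces A's two scans (find max, then collect) by one pass with a running max and a resettable candidate list; same O(n), no speed claim.

-- ===== PORT A =====
def obtener_maximos (frecuencias_palabras : List (String × Int)) : List (String × Int) :=
  let maximo : Int :=
    frecuencias_palabras.foldl (fun maximo tupla => if maximo < tupla.2 then tupla.2 else maximo) (-1)
  frecuencias_palabras.foldl
    (fun mas_frecuentes tupla => if maximo = tupla.2 then mas_frecuentes ++ [tupla] else mas_frecuentes) []

-- ===== PORT B =====
def obtener_maximos_alt (frecuencias_palabras : List (String × Int)) : List (String × Int) :=
  (frecuencias_palabras.foldl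
    (fun (st : Int × List (String × Int)) tupla =>
      if tupla.2 > st.1 then (tupla.2, [tupla])
      else if tupla.2 = st.1 then (st.1, st.2 ++ [tupla])
      else st)
    (-1, [])).2

-- ===== PRECONDITION & SPEC =====
def Spec_obtener_maximos (frecuencias_palabras : List (String × Int)) (out : List (String × Int)) : Prop := out = obtener_maximos_alt frecuencias_palabras
instance (frecuencias_palabras : List (String × Int)) (out : List (String × Int)) : Decidable (Spec_obtener_maximos frecuencias_palabras out) := by unfold Spec_obtener_maximos; infer_instance

-- ===== CLAIM (what is proved, stated in full; the proofs are below) =====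
def Claim_equal_obtener_maximos : Prop := ∀ (frecuencias_palabras : List (String × Int)), Dom_obtener_maximos frecuencias_palabras → Spec_obtener_maximos frecuencias_palabras (obtener_maximos frecuencias_palabras)

-- ===== LEMMAS AND PROOFS =====

-- A's max fold never decreases below its seed
lemma foldMax_ge (xs : List (String × Int)) (m : Int) :
    m ≤ xs.foldl (fun maximo tupla => if maximo < tupla.2 then tupla.2 else maximo) m := by
  induction xs generalizing m with
  | nil => simp
  | cons t xs ih =>
    simp only [List.foldl_cons]
    split
    · exact le_trans (le_of_lt (by assumption)) (ih t.2)
    · exact ih m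

-- invariant of B's single-pass fold: final max = A's fold's max, final list = (kept seed if max unchanged) ++ elements hitting the final max
lemma foldB_inv (xs : List (String × Int)) (m : Int) (l : List (String × Int)) :
    xs.foldl
      (fun (st : Int × List (String × Int)) tupla =>
        if tupla.2 > st.1 then (tupla.2, [tupla])
        else if tupla.2 = st.1 then (st.1, st.2 ++ [tupla])
        else st) (m, l)
    = (xs.foldl (fun maximo tupla => if maximo < tupla.2 then tupla.2 else maximo) m,
       (if xs.foldl (fun maximo tupla => if maximo < tupla.2 then tupla.2 else maximo) m = m then l else [])
         ++ xs.filter (fun tupla => xs.foldl (fun maximo tupla => if maximo < tupla.2 then tupla.2 else maximo) m = tupla.2)) := by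
  induction xs generalizing m l with
  | nil => simp
  | cons t xs ih =>
    simp only [List.foldl_cons, List.filter_cons, gt_iff_lt]
    by_cases h : m < t.2
    · simp only [if_pos h]
      rw [ih t.2 [t]]
      have hM := foldMax_ge xs t.2
      have hne : ¬ (xs.foldl (fun maximo tupla => if maximo < tupla.2 then tupla.2 else maximo) t.2 = m) := by
        intro he; omega
      rw [if_neg hne]
      by_cases he : xs.foldl (fun maximo tupla => if maximo < tupla.2 then tupla.2 else maximo) t.2 = t.2
      · simp [he]
      · simp [he]
    · simp only [if_neg h]
      have hM := foldMax_ge xs m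
      by_cases he : t.2 = m
      · rw [if_pos he, ih m (l ++ [t])]
        by_cases hu : xs.foldl (fun maximo tupla => if maximo < tupla.2 then tupla.2 else maximo) m = m
        · simp [hu, he]
        · have hv : ¬ (xs.foldl (fun maximo tupla => if maximo < tupla.2 then tupla.2 else maximo) m = t.2) := by
            rw [he]; exact hu
          simp [hu, hv]
      · rw [if_neg he, ih m l]
        have hv : ¬ (xs.foldl (fun maximo tupla => if maximo < tupla.2 then tupla.2 else maximo) m = t.2) := by
          intro hx; omega
        simp [hv]

-- ===== VERDICT (by name: the statement is the Claim_ definition above) =====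
theorem obtener_maximos_spec : Claim_equal_obtener_maximos := by
  intro xs _
  unfold Spec_obtener_maximos obtener_maximos obtener_maximos_alt
  rw [foldB_inv]
  simp [PySem.List.foldl_append_ite_eq_filter]
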